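-- pv_equiv track=rewrite | github.com/hdudakia/quota-usage | get_quota.py | categorize_objects
-- ===== SOURCE A (Python) =====
-- def categorize_objects(objects_data):
--     results = {'Less than 5': [], 'All': []}
--     for object_name, object_info in objects_data.items():
--         limit = object_info.get('limit', {}).get('maximum')
--         if limit == -1:
--             continue
--         usage = object_info.get('usage', {}).get('current')
--         if usage is None:
--             continue
--         difference = limit - usage
--         result = f"Object Name: {object_name}, Limit: {limit}, Usage: {usage}, Difference: {difference}"
--         if difference <= 5:
--             results['Less than 5'].append(result)
--         results['All'].append(result)
--     return results
-- ===== SOURCE B (Python) =====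
-- def categorize_objects(objects_data):
--     def entry(object_name, object_info, cutoff):
--         limit = object_info.get('limit', {}).get('maximum')
--         if limit == -1:
--             return None
--         usage = object_info.get('usage', {}).get('current')
--         if usage is None:
--             return None
--         difference = limit - usage
--         if cutoff is not None and difference > cutoff:
--             return None
--         return f"Object Name: {object_name}, Limit: {limit}, Usage: {usage}, Difference: {difference}"
--
--     def scan(cutoff):
--         out = []
--         for name, info in objects_data.items():
--             s = entry(name, info, cutoff)
--             if s is not None:
--                 out.append(s)
--         return out
--
--     return {'Less than 5': scan(5), 'All': scan(None)}
-- ===== Notes on version B (the rewrite author's own statement) =====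
-- stated objective: simpler
-- what changed: Instead of one interleaved loop maintaining two result buckets, B makes two independent full scans of objects_data, each producing one bucket directly from a cutoff-parameterised entry formatter ('Less than 5' with cutoff 5, 'All' with no cutoff); correct because each bucket is an independent filter of the same entry stream. Pre_ excludes association lists with duplicate keys (a Python dict cannot represent them, so first-match behaviour there is accidental) and entries with a usage value but no limit value, on which both A and B raise TypeError.
import Mathlib
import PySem

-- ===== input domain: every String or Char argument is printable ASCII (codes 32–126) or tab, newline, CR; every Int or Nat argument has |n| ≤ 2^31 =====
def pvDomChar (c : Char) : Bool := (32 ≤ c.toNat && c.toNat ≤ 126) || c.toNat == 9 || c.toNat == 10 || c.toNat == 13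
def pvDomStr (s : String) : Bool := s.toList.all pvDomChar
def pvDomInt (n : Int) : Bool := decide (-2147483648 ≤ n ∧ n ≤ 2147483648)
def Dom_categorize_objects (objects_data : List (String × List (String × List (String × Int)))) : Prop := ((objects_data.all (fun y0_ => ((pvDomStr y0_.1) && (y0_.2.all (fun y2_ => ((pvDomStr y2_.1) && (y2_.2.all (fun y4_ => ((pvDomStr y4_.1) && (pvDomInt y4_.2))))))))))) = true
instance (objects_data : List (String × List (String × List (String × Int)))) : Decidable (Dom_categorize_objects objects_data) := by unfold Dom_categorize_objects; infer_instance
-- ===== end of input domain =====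

-- B replaces A's interleaved two-bucket loop by two independent cutoff-parameterised scans (objective: simpler).


-- shared f-string formatter (both Pythons build the identical literal string)
def pvFmt (name : String) (limit usage diff : Int) : String :=
  "Object Name: " ++ name ++ ", Limit: " ++ PySem.Int.toStr limit ++ ", Usage: " ++
    PySem.Int.toStr usage ++ ", Difference: " ++ PySem.Int.toStr diff

-- ===== PORT A =====
-- loop body of A: two-bucket accumulator (results['Less than 5'], results['All'])
def pvStepA (results : List String × List String)
    (entry : String × List (String × List (String × Int))) : List String × List String :=
  let limit? := List.lookup "maximum" ((List.lookup "limit" entry.2).getD [])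
  if limit? = some (-1) then results
  else
    match List.lookup "current" ((List.lookup "usage" entry.2).getD []) with
    | none => results
    | some usage =>
      match limit? with
      | none => results   -- Python raises TypeError here (limit is None); excluded by Pre_
      | some limit =>
        let difference := limit - usage
        let result := pvFmt entry.1 limit usage difference
        ((if difference ≤ 5 then results.1 ++ [result] else results.1), results.2 ++ [result])

def categorize_objects (objects_data : List (String × List (String × List (String × Int)))) : List (String × List String) :=
  let r := objects_data.foldl pvStepA ([], [])
  [("Less than 5", r.1), ("All", r.2)]

-- ===== PORT B =====
-- B's helper entry(name, info, cutoff): formats a valid entry, dropping it when its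
-- difference exceeds the cutoff (cutoff = none means no cutoff)
def pvEntry? (cutoff : Option Int)
    (entry : String × List (String × List (String × Int))) : Option String :=
  let limit? := List.lookup "maximum" ((List.lookup "limit" entry.2).getD [])
  if limit? = some (-1) then none
  else
    match List.lookup "current" ((List.lookup "usage" entry.2).getD []) with
    | none => none
    | some usage =>
      match limit? with
      | none => none   -- Python raises TypeError here (limit is None); excluded by Pre_
      | some limit =>
        let difference := limit - usage
        match cutoff with
        | some c => if difference > c then none else some (pvFmt entry.1 limit usage difference)
        | none => some (pvFmt entry.1 limit usage difference)

-- B's scan(cutoff): one full pass over objects_data producing one bucket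
def pvScan (objects_data : List (String × List (String × List (String × Int))))
    (cutoff : Option Int) : List String :=
  objects_data.foldl (fun out e =>
    match pvEntry? cutoff e with
    | none => out
    | some s => out ++ [s]) []

def categorize_objects_alt (objects_data : List (String × List (String × List (String × Int)))) : List (String × List String) :=
  [("Less than 5", pvScan objects_data (some 5)), ("All", pvScan objects_data none)]

-- ===== PRECONDITION & SPEC =====
-- Pre_ excludes (a) association lists with duplicate keys at any dict level: a Python dict cannot
-- represent them, so the list's first-match behaviour there is accidental; and
-- (b) entries whose usage value is present but whose limit value is absent, on which both Pythons raise TypeError.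
def Pre_categorize_objects (objects_data : List (String × List (String × List (String × Int)))) : Prop :=
  (objects_data.map Prod.fst).Nodup ∧
  ∀ p ∈ objects_data,
    (p.2.map Prod.fst).Nodup ∧
    (∀ q ∈ p.2, (q.2.map Prod.fst).Nodup) ∧
    ((List.lookup "current" ((List.lookup "usage" p.2).getD [])).isSome →
     (List.lookup "maximum" ((List.lookup "limit" p.2).getD [])).isSome)
instance (objects_data : List (String × List (String × List (String × Int)))) : Decidable (Pre_categorize_objects objects_data) := by unfold Pre_categorize_objects; infer_instance

def pvWitness_categorize_objects : (List (String × List (String × List (String × Int)))) :=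
  [("vm", [("limit", [("maximum", 10)]), ("usage", [("current", 7)])]),
   ("net", [("limit", [("maximum", -1)]), ("usage", [("current", 2)])])]

def Spec_categorize_objects (objects_data : List (String × List (String × List (String × Int)))) (out : List (String × List String)) : Prop := out = categorize_objects_alt objects_data
instance (objects_data : List (String × List (String × List (String × Int)))) (out : List (String × List String)) : Decidable (Spec_categorize_objects objects_data out) := by unfold Spec_categorize_objects; infer_instance

-- ===== CLAIM (what is proved, stated in full; the proofs are below) =====
def Claim_equal_categorize_objects : Prop := ∀ (objects_data : List (String × List (String × List (String × Int)))), Dom_categorize_objects objects_data → Pre_categorize_objects objects_data → Spec_categorize_objects objects_data (categorize_objects objects_data)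

-- ===== LEMMAS AND PROOFS =====

-- the valid-entry selector both programs implement: formatted string plus its difference
def pvPick (entry : String × List (String × List (String × Int))) : Option (String × Int) :=
  match List.lookup "maximum" ((List.lookup "limit" entry.2).getD []),
        List.lookup "current" ((List.lookup "usage" entry.2).getD []) with
  | some limit, some usage =>
      if limit = -1 then none else some (pvFmt entry.1 limit usage (limit - usage), limit - usage)
  | _, _ => none

lemma stepA_eq (res : List String × List String) (e : String × List (String × List (String × Int))) :
    pvStepA res e = (match pvPick e with
      | none => res
      | some p => ((if p.2 ≤ 5 then res.1 ++ [p.1] else res.1), res.2 ++ [p.1])) := by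
  unfold pvStepA pvPick
  rcases h1 : List.lookup "maximum" ((List.lookup "limit" e.2).getD []) with _ | limit <;>
    rcases h2 : List.lookup "current" ((List.lookup "usage" e.2).getD []) with _ | usage <;>
    simp only [h1, h2] <;> split_ifs <;> simp_all

lemma entry_none_eq (e : String × List (String × List (String × Int))) :
    pvEntry? none e = (pvPick e).map Prod.fst := by
  unfold pvEntry? pvPick
  rcases h1 : List.lookup "maximum" ((List.lookup "limit" e.2).getD []) with _ | limit <;>
    rcases h2 : List.lookup "current" ((List.lookup "usage" e.2).getD []) with _ | usage <;>
    simp only [h1, h2] <;> split_ifs <;> simp_all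

lemma entry_some5_eq (e : String × List (String × List (String × Int))) :
    pvEntry? (some 5) e = (pvPick e).bind (fun p => if p.2 ≤ 5 then some p.1 else none) := by
  unfold pvEntry? pvPick
  rcases h1 : List.lookup "maximum" ((List.lookup "limit" e.2).getD []) with _ | limit <;>
    rcases h2 : List.lookup "current" ((List.lookup "usage" e.2).getD []) with _ | usage <;>
    simp only [h1, h2] <;> split_ifs <;> simp_all <;> omega

lemma scan_none_eq (l : List (String × List (String × List (String × Int)))) :
    ∀ acc, l.foldl (fun out e => match pvEntry? none e with
        | none => out | some s => out ++ [s]) acc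
      = acc ++ (l.filterMap pvPick).map Prod.fst := by
  induction l with
  | nil => simp
  | cons e t ih =>
    intro acc
    rw [List.foldl_cons, entry_none_eq]
    rcases hp : pvPick e with _ | p <;> simp [List.filterMap_cons, hp, ih]

lemma scan_some5_eq (l : List (String × List (String × List (String × Int)))) :
    ∀ acc, l.foldl (fun out e => match pvEntry? (some 5) e with
        | none => out | some s => out ++ [s]) acc
      = acc ++ ((l.filterMap pvPick).filter (fun p => p.2 ≤ 5)).map Prod.fst := by
  induction l with
  | nil => simp
  | cons e t ih =>
    intro acc
    rw [List.foldl_cons, entry_some5_eq]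
    rcases hp : pvPick e with _ | p
    · simp [List.filterMap_cons, hp, ih]
    · by_cases h5 : p.2 ≤ 5 <;> simp [List.filterMap_cons, hp, ih, h5]

lemma foldA_eq (l : List (String × List (String × List (String × Int)))) :
    ∀ x y, l.foldl pvStepA (x, y) =
      (x ++ ((l.filterMap pvPick).filter (fun p => p.2 ≤ 5)).map Prod.fst,
       y ++ (l.filterMap pvPick).map Prod.fst) := by
  induction l with
  | nil => simp
  | cons e t ih =>
    intro x y
    rw [List.foldl_cons, stepA_eq]
    rcases hp : pvPick e with _ | p
    · simp [List.filterMap_cons, hp, ih]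
    · by_cases h5 : p.2 ≤ 5 <;>
        simp [List.filterMap_cons, hp, ih, h5, List.append_assoc]

-- ===== VERDICT (by name: the statement is the Claim_ definition above) =====
theorem categorize_objects_spec : Claim_equal_categorize_objects := by
  intro l _ _
  show _ = _
  unfold categorize_objects categorize_objects_alt pvScan
  simp [foldA_eq, scan_none_eq, scan_some5_eq]
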